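-- pv_equiv track=rewrite | github.com/seungcle/problems | 프로그래머스/0/181935. 홀짝에 따라 다른 값 반환하기/홀짝에 따라 다른 값 반환하기.py | solution
-- ===== SOURCE A (Python) =====
-- def solution(n):
--     answer = 0
--     if n % 2 == 1:
--         for i in range((n+1)//2):
--             answer += 2*i + 1
--     else :
--         for i in range((n+2)//2):
--             answer += 4 * i * i
--     return answer
-- ===== SOURCE B (Python) =====
-- def solution(n):
--     if n % 2 == 1:
--         k = (n + 1) // 2
--         return k * k if k > 0 else 0
--     k = n // 2 + 1
--     return 2 * (k - 1) * k * (2 * k - 1) // 3 if k > 0 else 0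
-- ===== Notes on version B (the rewrite author's own statement) =====
-- stated objective: faster
-- what changed: Replaced the accumulation loops by closed-form expressions: the square of the number of summed odd terms for odd n, and the polynomial sum-of-squares formula for even n.
import Mathlib
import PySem

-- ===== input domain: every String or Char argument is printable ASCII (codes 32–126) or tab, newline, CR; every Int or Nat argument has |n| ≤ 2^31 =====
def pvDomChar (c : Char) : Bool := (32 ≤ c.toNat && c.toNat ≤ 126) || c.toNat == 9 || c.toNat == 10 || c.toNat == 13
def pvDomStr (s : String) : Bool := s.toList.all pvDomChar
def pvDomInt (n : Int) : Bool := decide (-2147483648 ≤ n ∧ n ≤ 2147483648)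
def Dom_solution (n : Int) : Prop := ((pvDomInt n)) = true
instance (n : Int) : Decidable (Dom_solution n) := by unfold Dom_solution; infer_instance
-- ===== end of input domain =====

-- B replaces A's O(n) summation loops by O(1) closed-form formulas (same return value).

-- ===== PORT A =====
def solution (n : Int) : Int :=
  if PySem.Int.mod n 2 == 1 then
    (PySem.List.pyRange 0 (PySem.Int.floordiv (n + 1) 2) 1).foldl
      (fun answer i => answer + (2 * i + 1)) 0
  else
    (PySem.List.pyRange 0 (PySem.Int.floordiv (n + 2) 2) 1).foldl
      (fun answer i => answer + 4 * i * i) 0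

-- ===== PORT B =====
def solution_alt (n : Int) : Int :=
  if PySem.Int.mod n 2 == 1 then
    let k := PySem.Int.floordiv (n + 1) 2
    if k > 0 then k * k else 0
  else
    let k := PySem.Int.floordiv n 2 + 1
    if k > 0 then PySem.Int.floordiv (2 * (k - 1) * k * (2 * k - 1)) 3 else 0

-- ===== PRECONDITION & SPEC =====
def Spec_solution (n : Int) (out : Int) : Prop := out = solution_alt n
instance (n : Int) (out : Int) : Decidable (Spec_solution n out) := by unfold Spec_solution; infer_instance

-- ===== CLAIM (what is proved, stated in full; the proofs are below) =====
def Claim_equal_solution : Prop := ∀ (n : Int), Dom_solution n → Spec_solution n (solution n)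

-- ===== LEMMAS AND PROOFS =====

-- sum of the first m odd numbers is m^2
lemma pv_odd_sum (m : Nat) :
    (PySem.List.pyRange 0 (m : Int) 1).foldl (fun answer i => answer + (2 * i + 1)) 0
      = (m : Int) * m := by
  induction m with
  | zero => simp [PySem.List.pyRange_one_eq_nil]
  | succ m ih =>
    have h : ((m + 1 : Nat) : Int) = (m : Int) + 1 := by push_cast; ring
    rw [h, PySem.List.pyRange_one_succ_right (by positivity), List.foldl_append, ih]
    simp; ring

-- 3 * (sum of 4*i*i for i < m) = 2*(m-1)*m*(2m-1)
lemma pv_even_sum (m : Nat) :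
    3 * ((PySem.List.pyRange 0 (m : Int) 1).foldl (fun answer i => answer + 4 * i * i) 0)
      = 2 * ((m : Int) - 1) * m * (2 * m - 1) := by
  induction m with
  | zero => simp [PySem.List.pyRange_one_eq_nil]
  | succ m ih =>
    have h : ((m + 1 : Nat) : Int) = (m : Int) + 1 := by push_cast; ring
    rw [h, PySem.List.pyRange_one_succ_right (by positivity), List.foldl_append]
    simp only [List.foldl_cons, List.foldl_nil]
    ring_nf
    ring_nf at ih
    omega

lemma pv_empty_of_nonpos {k : Int} (f : Int → Int → Int) (hk : k ≤ 0) :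
    (PySem.List.pyRange 0 k 1).foldl f 0 = 0 := by
  rw [PySem.List.pyRange_one_eq_nil hk]; rfl

-- ===== VERDICT (by name: the statement is the Claim_ definition above) =====
theorem solution_spec : Claim_equal_solution := by
  intro n _
  unfold Spec_solution solution solution_alt
  have hfd : ∀ a : Int, PySem.Int.floordiv a 2 = a / 2 := fun a =>
    PySem.Int.floordiv_eq_ediv_of_pos (by norm_num)
  have hk2 : PySem.Int.floordiv (n + 2) 2 = PySem.Int.floordiv n 2 + 1 := by
    rw [hfd, hfd]; omega
  split
  · -- odd branch
    set k := PySem.Int.floordiv (n + 1) 2 with hk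
    by_cases hkp : k > 0
    · have hkn : k = ((k.toNat : Nat) : Int) := (Int.toNat_of_nonneg (le_of_lt hkp)).symm
      conv_lhs => rw [hkn]
      rw [pv_odd_sum, if_pos hkp, ← hkn]
    · rw [pv_empty_of_nonpos _ (by omega)]
      simp [if_neg hkp]
  · -- even branch
    rw [hk2]
    set k := PySem.Int.floordiv n 2 + 1 with hk
    by_cases hkp : k > 0
    · have hkn : k = ((k.toNat : Nat) : Int) := (Int.toNat_of_nonneg (le_of_lt hkp)).symm
      have h3 := pv_even_sum k.toNat
      rw [← hkn] at h3
      have hfd3 : PySem.Int.floordiv (2 * (k - 1) * k * (2 * k - 1)) 3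
          = 2 * (k - 1) * k * (2 * k - 1) / 3 := PySem.Int.floordiv_eq_ediv_of_pos (by norm_num)
      rw [if_pos hkp, hfd3]
      generalize hP : 2 * (k - 1) * k * (2 * k - 1) = P at h3 ⊢
      omega
    · rw [pv_empty_of_nonpos _ (by omega)]
      simp [if_neg hkp]
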